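-- pv_equiv track=rewrite | github.com/ModerRAS/mountblade-code | TaleWorlds.Native/src/scripts/beautify_01_init_unk_vars.py | rename_unk_variables
-- ===== SOURCE A (Python) =====
-- def rename_unk_variables(content):
--     """重命名UNK_变量"""
--
--     # UNK_变量重命名映射
--     # 基于变量的用途和上下文进行命名
--     replacements = {
--         'UNK_1809fec50': 'SystemContextManagerConfig',
--         'UNK_1809fed10': 'SystemContextManagerData',
--         'UNK_1809fed78': 'SystemContextManagerStatus',
--         'UNK_1809fed40': 'SystemContextManagerControl',
--         'UNK_1809feda8': 'SystemResourceDataTable',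
--         'UNK_1809feec8': 'SystemMemoryAllocationTable',
--         'UNK_1809feeb8': 'SystemMemoryReferenceTable'
--     }
--
--     # 执行替换
--     for old_name, new_name in replacements.items():
--         content = content.replace(f'&{old_name}', f'&{new_name}')
--
--     return content
-- ===== SOURCE B (Python) =====
-- def rename_unk_variables(content):
--     """重命名UNK_变量 — single scan: a dict lookup per candidate position instead of seven full replace passes"""
--     replacements = {
--         'UNK_1809fec50': 'SystemContextManagerConfig',
--         'UNK_1809fed10': 'SystemContextManagerData',
--         'UNK_1809fed78': 'SystemContextManagerStatus',
--         'UNK_1809fed40': 'SystemContextManagerControl',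
--         'UNK_1809feda8': 'SystemResourceDataTable',
--         'UNK_1809feec8': 'SystemMemoryAllocationTable',
--         'UNK_1809feeb8': 'SystemMemoryReferenceTable'
--     }
--     out = []
--     i = 0
--     n = len(content)
--     while i < n:
--         if content[i] == '&':
--             new = replacements.get(content[i + 1:i + 14])  # every key is 13 chars long
--             if new is not None:
--                 out.append('&' + new)
--                 i += 14
--                 continue
--         out.append(content[i])
--         i += 1
--     return ''.join(out)
-- ===== Notes on version B (the rewrite author's own statement) =====
-- stated objective: alternative
-- what changed: A makes seven sequential full-string replace passes (one per UNK_ name); B makes a single left-to-right scan that, at each ampersand, looks the following 13 characters up in the dict once and emits the replacement, so the text is traversed once instead of seven times.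
import Mathlib
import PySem

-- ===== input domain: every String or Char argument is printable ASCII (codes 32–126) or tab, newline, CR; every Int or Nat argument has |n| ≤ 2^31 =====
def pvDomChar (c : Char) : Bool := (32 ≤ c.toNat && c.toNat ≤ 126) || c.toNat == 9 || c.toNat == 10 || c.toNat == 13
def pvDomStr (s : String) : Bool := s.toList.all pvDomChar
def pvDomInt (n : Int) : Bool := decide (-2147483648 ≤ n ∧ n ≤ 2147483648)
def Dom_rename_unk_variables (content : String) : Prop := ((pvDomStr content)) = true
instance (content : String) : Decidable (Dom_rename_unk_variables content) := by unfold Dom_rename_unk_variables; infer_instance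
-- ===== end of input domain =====

-- B replaces A's seven sequential full-string replace passes by ONE left-to-right scan that
-- looks the 13 characters after each '&' up in the mapping once (alternative decomposition, not measured faster).

-- ===== PORT A =====
-- A's replacement dict, in its literal insertion order
def replacementsA : PySem.Dict String String := PySem.Dict.mk [
  ("UNK_1809fec50", "SystemContextManagerConfig"),
  ("UNK_1809fed10", "SystemContextManagerData"),
  ("UNK_1809fed78", "SystemContextManagerStatus"),
  ("UNK_1809fed40", "SystemContextManagerControl"),
  ("UNK_1809feda8", "SystemResourceDataTable"),
  ("UNK_1809feec8", "SystemMemoryAllocationTable"),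
  ("UNK_1809feeb8", "SystemMemoryReferenceTable")]

-- for old_name, new_name in replacements.items(): content = content.replace(f'&{old_name}', f'&{new_name}')
def rename_unk_variables (content : String) : String :=
  (PySem.Dict.items replacementsA).foldl
    (fun c p => PySem.Str.replace c ("&" ++ p.1) ("&" ++ p.2)) content

-- ===== PORT B =====
-- B's dict, keyed by the 13-character UNK_ name (as in Source B)
def replacementsB : PySem.Dict (List Char) (List Char) := PySem.Dict.mk [
  ("UNK_1809fec50".toList, "SystemContextManagerConfig".toList),
  ("UNK_1809fed10".toList, "SystemContextManagerData".toList),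
  ("UNK_1809fed78".toList, "SystemContextManagerStatus".toList),
  ("UNK_1809fed40".toList, "SystemContextManagerControl".toList),
  ("UNK_1809feda8".toList, "SystemResourceDataTable".toList),
  ("UNK_1809feec8".toList, "SystemMemoryAllocationTable".toList),
  ("UNK_1809feeb8".toList, "SystemMemoryReferenceTable".toList)]

-- the single scan of Source B: at '&', look up content[i+1:i+14]; on a hit emit '&'+new and skip 14
def bScan : List Char → List Char
  | [] => []
  | c :: t =>
    if c = '&' then
      match PySem.Dict.get? replacementsB (t.take 13) with
      | some v => ('&' :: v) ++ bScan (t.drop 13)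
      | none => c :: bScan t
    else c :: bScan t
termination_by s => s.length
decreasing_by all_goals (simp [List.length_drop]; try omega)

def rename_unk_variables_alt (content : String) : String :=
  String.ofList (bScan content.toList)

-- ===== PRECONDITION & SPEC =====
def Spec_rename_unk_variables (content : String) (out : String) : Prop := out = rename_unk_variables_alt content
instance (content : String) (out : String) : Decidable (Spec_rename_unk_variables content out) := by unfold Spec_rename_unk_variables; infer_instance

-- ===== CLAIM (what is proved, stated in full; the proofs are below) =====
def Claim_equal_rename_unk_variables : Prop := ∀ (content : String), Dom_rename_unk_variables content → Spec_rename_unk_variables content (rename_unk_variables content)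

-- ===== LEMMAS AND PROOFS =====

-- rep k v s : the result of one Python s.replace(k, v) pass, as a structural scan
def rep (k v : List Char) : List Char → List Char
  | [] => []
  | c :: t => if k.isPrefixOf (c :: t) then v ++ rep k v (t.drop (k.length - 1)) else c :: rep k v t
termination_by s => s.length
decreasing_by all_goals (simp [List.length_drop]; try omega)

def stepR (s : List Char) (p : List Char × List Char) : List Char := rep p.1 p.2 s

-- the seven ('&'+key, '&'+value) pairs, in dict order
def PP : List (List Char × List Char) :=
  (PySem.Dict.items replacementsB).map (fun p => ('&' :: p.1, '&' :: p.2))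

theorem rep_nil (k v : List Char) : rep k v [] = [] := by simp [rep]

theorem rep_cons_pos {k : List Char} (v : List Char) {c : Char} {t : List Char}
    (hk : k ≠ []) (h : k <+: c :: t) :
    rep k v (c :: t) = v ++ rep k v ((c :: t).drop k.length) := by
  rw [rep, if_pos (List.isPrefixOf_iff_prefix.mpr h)]
  obtain ⟨a, k', rfl⟩ := List.exists_cons_of_ne_nil hk
  simp

theorem rep_cons_neg {k : List Char} (v : List Char) {c : Char} {t : List Char}
    (h : ¬ k <+: c :: t) : rep k v (c :: t) = c :: rep k v t := by
  rw [rep, if_neg (fun hh => h (List.isPrefixOf_iff_prefix.mp hh))]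

theorem rep_append {k : List Char} (v : List Char) (hk : k ≠ []) (u : List Char) :
    rep k v (k ++ u) = v ++ rep k v u := by
  obtain ⟨a, k', rfl⟩ := List.exists_cons_of_ne_nil hk
  rw [show (a :: k') ++ u = a :: (k' ++ u) from rfl,
      rep_cons_pos v hk (by simpa using List.prefix_append _ u)]
  congr 1
  rw [show a :: (k' ++ u) = (a :: k') ++ u from rfl, List.drop_left]

theorem go_spec (k v : List Char) (hk : k ≠ []) :
    ∀ fuel l acc, l.length ≤ fuel →
      PySem.Chars.replace.go k v fuel l acc = acc.reverse ++ rep k v l := by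
  intro fuel
  have hk1 : 1 ≤ k.length := List.length_pos_iff.mpr hk
  induction fuel with
  | zero =>
    intro l acc h
    have hl : l = [] := by cases l <;> simp_all
    subst hl
    simp [PySem.Chars.replace.go, rep_nil]
  | succ n ih =>
    intro l acc h
    cases l with
    | nil => simp [PySem.Chars.replace.go, rep_nil]
    | cons c t =>
      rw [PySem.Chars.replace.go]
      by_cases hp : k.isPrefixOf (c :: t)
      · rw [if_pos hp]
        have hpre := List.isPrefixOf_iff_prefix.mp hp
        rw [ih _ _ (by simp at h ⊢; omega), rep_cons_pos v hk hpre]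
        simp
      · rw [if_neg hp, ih _ _ (by simp at h ⊢; omega),
            rep_cons_neg v (fun hh => hp (List.isPrefixOf_iff_prefix.mpr hh))]
        simp

theorem replace_eq_rep (s k v : List Char) (hk : k ≠ []) :
    PySem.Chars.replace s k v = rep k v s := by
  rw [PySem.Chars.replace, if_neg (by simp [hk]), go_spec k v hk s.length s [] le_rfl]
  simp

theorem replace_amp (s t u : List Char) (a : Char) :
    PySem.Chars.replace s (a :: t) u = rep (a :: t) u s :=
  replace_eq_rep s _ u (by simp)

theorem prefix_head? {a : Char} {q x : List Char} (h : a :: q <+: x) : x.head? = some a := by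
  obtain ⟨r, rfl⟩ := h; rfl

theorem not_prefix_of_head? {k x : List Char} {a b : Char}
    (hk : k.head? = some a) (hx : x.head? = some b) (hne : a ≠ b) : ¬ k <+: x := by
  intro h
  cases k with
  | nil => simp at hk
  | cons a' k' =>
    simp at hk
    subst hk
    rw [prefix_head? h] at hx
    exact hne (by injection hx)

theorem rep_skip (k v : List Char) (_hk : k ≠ []) :
    ∀ (v' u : List Char), (∀ m, m < v'.length → ¬ k <+: (v'.drop m ++ u)) →
      rep k v (v' ++ u) = v' ++ rep k v u := by
  intro v'
  induction v' with
  | nil => simp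
  | cons c w ih =>
    intro u H
    have h0 : ¬ k <+: c :: (w ++ u) := H 0 (by simp)
    rw [show (c :: w) ++ u = c :: (w ++ u) from rfl, rep_cons_neg v h0,
        ih u (fun m hm => by simpa using H (m + 1) (by simp; omega))]
    rfl

theorem skip_cond (k v' u : List Char) (hhead : k.head? = some '&')
    (hlen : k.length ≤ v'.length) (hnp : ¬ k <+: v')
    (hamp : ∀ i, (hi : i < v'.length) → 0 < i → v'[i] ≠ '&') :
    ∀ m, m < v'.length → ¬ k <+: (v'.drop m ++ u) := by
  intro m hm hpre
  rcases Nat.eq_zero_or_pos m with rfl | hmpos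
  · simp at hpre
    apply hnp
    rw [List.prefix_iff_eq_take] at hpre ⊢
    exact hpre.trans (List.take_append_of_le_length hlen)
  · have hne : v'.drop m ≠ [] := by
      intro h
      rw [List.drop_eq_nil_iff] at h
      omega
    have hh : (v'.drop m ++ u).head? = some v'[m] := by
      rw [List.head?_append_of_ne_nil _ hne, List.head?_drop, List.getElem?_eq_getElem hm]
    exact not_prefix_of_head? hhead hh (Ne.symm (hamp m hm hmpos)) hpre

theorem rep_transfer (k v : List Char) (hk : k.head? = some '&') (hv : v.head? = some '&') :
    ∀ n t q, t.length ≤ n → ('&' : Char) ∉ q → (q <+: rep k v t ↔ q <+: t) := by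
  intro n
  induction n with
  | zero =>
    intro t q ht _
    have hl : t = [] := by cases t <;> simp_all
    subst hl
    rw [rep_nil]
  | succ n ih =>
    intro t q ht hq
    cases t with
    | nil => rw [rep_nil]
    | cons c t' =>
      have hkne : k ≠ [] := by intro h; subst h; simp at hk
      by_cases hp : k <+: c :: t'
      · rw [rep_cons_pos v hkne hp]
        cases q with
        | nil => simp
        | cons a q' =>
          have ha : a ≠ '&' := fun h => hq (h ▸ List.mem_cons_self)
          constructor
          · intro h
            exfalso
            obtain ⟨b, v', rfl⟩ := List.exists_cons_of_ne_nil
              (show v ≠ [] by intro hh; subst hh; simp at hv)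
            have hb : b = '&' := by simpa using hv
            have hba := prefix_head? h
            simp at hba
            exact ha (hba ▸ hb)
          · intro h
            exfalso
            obtain ⟨k', rfl⟩ : ∃ k', k = '&' :: k' := by
              cases k with
              | nil => simp at hk
              | cons x xs => exact ⟨xs, by simp at hk; rw [hk]⟩
            have hc : c = '&' := by have := prefix_head? hp; simpa using this
            have hca := prefix_head? h
            simp at hca
            exact ha (hca ▸ hc)
      · rw [rep_cons_neg v hp]
        cases q with
        | nil => simp
        | cons a q' =>
          rw [List.cons_prefix_cons, List.cons_prefix_cons,
              ih t' q' (by simp at ht; omega) (fun h => hq (List.mem_cons_of_mem _ h))]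

-- the shape invariants of the replacement table that make the seven passes independent
def GoodP (ps : List (List Char × List Char)) : Prop :=
  (∀ p ∈ ps, p.1.head? = some '&' ∧ ('&' : Char) ∉ p.1.tail ∧ p.2.head? = some '&' ∧
    ('&' : Char) ∉ p.2.tail ∧ p.1.length ≤ p.2.length) ∧
  (∀ p ∈ ps, ∀ q ∈ ps, ¬ q.1 <+: p.2) ∧
  (∀ p ∈ ps, ∀ q ∈ ps, q.1.length = p.1.length)

theorem GoodP_tail {p : List Char × List Char} {ps : List (List Char × List Char)}
    (h : GoodP (p :: ps)) : GoodP ps := by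
  obtain ⟨h1, h2, h3⟩ := h
  exact ⟨fun q hq => h1 q (List.mem_cons_of_mem _ hq),
         fun q hq r hr => h2 q (List.mem_cons_of_mem _ hq) r (List.mem_cons_of_mem _ hr),
         fun q hq r hr => h3 q (List.mem_cons_of_mem _ hq) r (List.mem_cons_of_mem _ hr)⟩

theorem tail_amp {l : List Char} (h : ('&' : Char) ∉ l.tail) :
    ∀ i, (hi : i < l.length) → 0 < i → l[i] ≠ '&' := by
  intro i hi hip heq
  cases l with
  | nil => simp at hi
  | cons a l' =>
    obtain ⟨j, rfl⟩ : ∃ j, i = j + 1 := ⟨i - 1, by omega⟩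
    exact h (heq ▸ List.getElem_mem (by simpa using hi))

theorem foldSkip : ∀ (ps : List (List Char × List Char)) (v' : List Char),
    (∀ q ∈ ps, q.1.head? = some '&' ∧ q.1.length ≤ v'.length ∧ ¬ q.1 <+: v') →
    (∀ i, (hi : i < v'.length) → 0 < i → v'[i] ≠ '&') →
    ∀ x, List.foldl stepR (v' ++ x) ps = v' ++ List.foldl stepR x ps := by
  intro ps
  induction ps with
  | nil => simp
  | cons p ps ih =>
    intro v' hc hamp x
    obtain ⟨h1, h2, h3⟩ := hc p List.mem_cons_self
    have hkne : p.1 ≠ [] := by intro h; rw [h] at h1; simp at h1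
    rw [List.foldl_cons, List.foldl_cons]
    show List.foldl stepR (rep p.1 p.2 (v' ++ x)) ps = v' ++ List.foldl stepR (rep p.1 p.2 x) ps
    rw [rep_skip p.1 p.2 hkne v' x (skip_cond _ _ _ h1 h2 h3 hamp)]
    exact ih v' (fun q hq => hc q (List.mem_cons_of_mem _ hq)) hamp _

theorem foldA (pk pv : List Char) : ∀ (ps : List (List Char × List Char)),
    GoodP ps → (ps.map Prod.fst).Nodup → (pk, pv) ∈ ps → ∀ u,
    List.foldl stepR (pk ++ u) ps = pv ++ List.foldl stepR u ps := by
  intro ps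
  induction ps with
  | nil => intro _ _ hp; simp at hp
  | cons p ps ih =>
    intro hg hnd hp u
    have hkne : pk ≠ [] := by
      intro h
      have := (hg.1 (pk, pv) hp).1
      rw [h] at this; simp at this
    rcases List.mem_cons.mp hp with heq | hmem
    · subst heq
      rw [List.foldl_cons, List.foldl_cons]
      show List.foldl stepR (rep pk pv (pk ++ u)) ps = pv ++ List.foldl stepR (rep pk pv u) ps
      rw [rep_append pv hkne u]
      apply foldSkip ps pv ?_ (tail_amp (hg.1 (pk, pv) hp).2.2.2.1)
      intro q hq
      refine ⟨(hg.1 q (List.mem_cons_of_mem _ hq)).1, ?_,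
        hg.2.1 (pk, pv) hp q (List.mem_cons_of_mem _ hq)⟩
      exact (hg.2.2 (pk, pv) hp q (List.mem_cons_of_mem _ hq)).le.trans
        (hg.1 (pk, pv) hp).2.2.2.2
    · have hpkne : p.1 ≠ pk := by
        intro h
        exact (List.nodup_cons.mp hnd).1 (List.mem_map.mpr ⟨(pk, pv), hmem, h.symm⟩)
      have hp1ne : p.1 ≠ [] := by
        intro h
        have := (hg.1 p List.mem_cons_self).1
        rw [h] at this; simp at this
      rw [List.foldl_cons, List.foldl_cons]
      show List.foldl stepR (rep p.1 p.2 (pk ++ u)) ps = pv ++ List.foldl stepR (rep p.1 p.2 u) ps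
      have hlen : p.1.length ≤ pk.length :=
        le_of_eq (hg.2.2 (pk, pv) hp p List.mem_cons_self)
      have hnp : ¬ p.1 <+: pk := fun h =>
        hpkne (h.eq_of_length (hg.2.2 (pk, pv) hp p List.mem_cons_self))
      rw [rep_skip p.1 p.2 hp1ne pk u
        (skip_cond _ _ _ (hg.1 p List.mem_cons_self).1 hlen hnp
          (tail_amp (hg.1 (pk, pv) hp).2.1))]
      exact ih (GoodP_tail hg) (List.nodup_cons.mp hnd).2 hmem _

theorem foldB : ∀ (ps : List (List Char × List Char)), GoodP ps →
    ∀ (c : Char) (t : List Char), (∀ q ∈ ps, ¬ q.1 <+: c :: t) →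
    List.foldl stepR (c :: t) ps = c :: List.foldl stepR t ps := by
  intro ps
  induction ps with
  | nil => simp
  | cons p ps ih =>
    intro hg c t hnp
    rw [List.foldl_cons, List.foldl_cons]
    show List.foldl stepR (rep p.1 p.2 (c :: t)) ps = c :: List.foldl stepR (rep p.1 p.2 t) ps
    rw [rep_cons_neg p.2 (hnp p List.mem_cons_self)]
    apply ih (GoodP_tail hg) c (rep p.1 p.2 t)
    intro q hq hpre
    have hq' := hg.1 q (List.mem_cons_of_mem _ hq)
    have hq1 : q.1.head? = some '&' := hq'.1
    obtain ⟨a, q', hqe⟩ : ∃ a q', q.1 = a :: q' := by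
      cases hqq : q.1 with
      | nil => rw [hqq] at hq1; simp at hq1
      | cons x xs => exact ⟨x, xs, rfl⟩
    have ha : a = '&' := by rw [hqe] at hq1; simpa using hq1
    rw [hqe] at hpre
    by_cases hc : c = '&'
    · subst hc
      subst ha
      have h2 : q' <+: rep p.1 p.2 t := (List.cons_prefix_cons.mp hpre).2
      have hq2 : ('&' : Char) ∉ q' := by
        have := hq'.2.1
        rw [hqe] at this
        simpa using this
      have h3 : q' <+: t := (rep_transfer p.1 p.2 (hg.1 p List.mem_cons_self).1
        (hg.1 p List.mem_cons_self).2.2.1 t.length t q' le_rfl hq2).mp h2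
      refine hnp q (List.mem_cons_of_mem _ hq) ?_
      rw [hqe]
      exact List.cons_prefix_cons.mpr ⟨rfl, h3⟩
    · exact not_prefix_of_head? (by simp [ha]) rfl
        (show ('&' : Char) ≠ c from fun h => hc h.symm) hpre

theorem foldNil : ∀ ps : List (List Char × List Char), List.foldl stepR [] ps = [] := by
  intro ps
  induction ps with
  | nil => rfl
  | cons p ps ih => rw [List.foldl_cons]; show List.foldl stepR (rep p.1 p.2 []) ps = _; rw [rep_nil, ih]

theorem goodPP : GoodP PP := by
  unfold GoodP
  refine ⟨?_, ?_, ?_⟩ <;> decide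

theorem nodupPP : (PP.map Prod.fst).Nodup := by decide

theorem len13 : ∀ p ∈ PySem.Dict.items replacementsB, p.1.length = 13 := by decide

theorem nodupKeysB : (PySem.Dict.keys replacementsB).Nodup := by decide

theorem mainEq : ∀ n L, L.length ≤ n → List.foldl stepR L PP = bScan L := by
  intro n
  induction n with
  | zero =>
    intro L h
    have hl : L = [] := by cases L <;> simp_all
    subst hl
    rw [foldNil, bScan.eq_def]
  | succ n ih =>
    intro L h
    cases L with
    | nil => rw [foldNil, bScan.eq_def]
    | cons c t =>
      by_cases hc : c = '&'
      · subst hc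
        cases hdict : PySem.Dict.get? replacementsB (t.take 13) with
        | some v =>
          have hmem := PySem.Dict.mem_items_of_get?_eq_some replacementsB hdict
          have hlen13 : (t.take 13).length = 13 := len13 _ hmem
          have hlenle : 13 ≤ t.length := by simp [List.length_take] at hlen13; omega
          have hPmem : ('&' :: t.take 13, '&' :: v) ∈ PP :=
            List.mem_map.mpr ⟨(t.take 13, v), hmem, rfl⟩
          rw [show ('&' :: t : List Char) = ('&' :: t.take 13) ++ t.drop 13 by
                simp [List.take_append_drop]]
          rw [foldA ('&' :: t.take 13) ('&' :: v) PP goodPP nodupPP hPmem (t.drop 13)]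
          rw [ih (t.drop 13) (by simp at h ⊢; omega)]
          conv_rhs => rw [bScan.eq_def]
          simp [hdict]
        | none =>
          have hnp : ∀ q ∈ PP, ¬ q.1 <+: '&' :: t := by
            intro q hq hpre
            obtain ⟨r, hr, rfl⟩ := List.mem_map.mp hq
            have h1 : r.1 <+: t := (List.cons_prefix_cons.mp hpre).2
            have h2 : t.take 13 = r.1 := by
              have := List.prefix_iff_eq_take.mp h1
              rw [len13 r hr] at this
              exact this.symm
            rw [h2, PySem.Dict.get?_of_mem_items replacementsB hr nodupKeysB] at hdict
            exact Option.some_ne_none _ hdict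
          rw [foldB PP goodPP '&' t hnp, ih t (by simp at h; omega)]
          conv_rhs => rw [bScan.eq_def]
          simp [hdict]
      · have hnp : ∀ q ∈ PP, ¬ q.1 <+: c :: t := by
          intro q hq
          obtain ⟨r, hr, rfl⟩ := List.mem_map.mp hq
          exact not_prefix_of_head? rfl rfl (fun h => hc h.symm)
        rw [foldB PP goodPP c t hnp, ih t (by simp at h; omega)]
        conv_rhs => rw [bScan.eq_def]
        simp [hc]

theorem A_toList (content : String) :
    (rename_unk_variables content).toList = List.foldl stepR content.toList PP := by
  simp only [rename_unk_variables, replacementsA, PP, replacementsB,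
    List.map, List.foldl]
  simp [PySem.Str.replace, replace_amp, stepR]

-- ===== VERDICT (by name: the statement is the Claim_ definition above) =====
theorem rename_unk_variables_spec : Claim_equal_rename_unk_variables := by
  intro content _
  unfold Spec_rename_unk_variables
  apply String.toList_inj.mp
  rw [A_toList]
  simp only [rename_unk_variables_alt, String.toList_ofList]
  exact mainEq content.toList.length content.toList le_rfl
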